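-- pv_equiv track=rewrite | github.com/Palushok/padel_test | src/evaluation/metrics.py | match_events_temporal
-- ===== SOURCE A (Python) =====
-- def match_events_temporal(
--     pred_frames: list[int],
--     gt_frames: list[int],
--     tolerance: int,
-- ) -> tuple[list[tuple[int, int]], list[int], list[int]]:
--     """Greedy temporal matching of predicted events to GT events.
--
--     Each GT event is matched to the closest unmatched prediction within
--     *tolerance* frames.  Matching is greedy by ascending distance.
--
--     Returns:
--         matched: list of (pred_frame, gt_frame) pairs
--         unmatched_pred: prediction frames with no GT match (false positives)
--         unmatched_gt: GT frames with no prediction match (false negatives)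
--     """
--     if not pred_frames or not gt_frames:
--         return [], list(pred_frames), list(gt_frames)
--
--     candidates: list[tuple[int, int, int]] = []  # (|d|, pred_idx, gt_idx)
--     for pi, pf in enumerate(pred_frames):
--         for gi, gf in enumerate(gt_frames):
--             d = abs(pf - gf)
--             if d <= tolerance:
--                 candidates.append((d, pi, gi))
--
--     candidates.sort()
--
--     used_pred: set[int] = set()
--     used_gt: set[int] = set()
--     matched: list[tuple[int, int]] = []
--
--     for _, pi, gi in candidates:
--         if pi in used_pred or gi in used_gt:
--             continue
--         matched.append((pred_frames[pi], gt_frames[gi]))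
--         used_pred.add(pi)
--         used_gt.add(gi)
--
--     unmatched_pred = [f for i, f in enumerate(pred_frames) if i not in used_pred]
--     unmatched_gt = [f for i, f in enumerate(gt_frames) if i not in used_gt]
--     return matched, unmatched_pred, unmatched_gt
-- ===== SOURCE B (Python) =====
-- def _bisect_left(a, x):
--     lo, hi = 0, len(a)
--     while lo < hi:
--         mid = (lo + hi) // 2
--         if a[mid] < x:
--             lo = mid + 1
--         else:
--             hi = mid
--     return lo
--
--
-- def _bisect_right(a, x):
--     lo, hi = 0, len(a)
--     while lo < hi:
--         mid = (lo + hi) // 2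
--         if x < a[mid]:
--             hi = mid
--         else:
--             lo = mid + 1
--     return lo
--
--
-- def match_events_temporal(
--     pred_frames: list[int],
--     gt_frames: list[int],
--     tolerance: int,
-- ) -> tuple[list[tuple[int, int]], list[int], list[int]]:
--     """Sort the GT frames once; per prediction, binary-search the in-tolerance
--     window [pf - tolerance, pf + tolerance], so only in-tolerance candidate
--     pairs are generated; then sort those and match greedily by ascending
--     distance, exactly as the greedy matching specifies."""
--     if not pred_frames or not gt_frames:
--         return [], list(pred_frames), list(gt_frames)
--
--     gt_sorted = sorted((gf, gi) for gi, gf in enumerate(gt_frames))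
--     gt_vals = [gf for gf, _ in gt_sorted]
--
--     candidates: list[tuple[int, int, int]] = []  # (|d|, pred_idx, gt_idx)
--     for pi, pf in enumerate(pred_frames):
--         lo = _bisect_left(gt_vals, pf - tolerance)
--         hi = _bisect_right(gt_vals, pf + tolerance)
--         for gf, gi in gt_sorted[lo:hi]:
--             candidates.append((abs(pf - gf), pi, gi))
--     candidates.sort()
--
--     used_pred: set[int] = set()
--     used_gt: set[int] = set()
--     matched: list[tuple[int, int]] = []
--     for _, pi, gi in candidates:
--         if pi in used_pred or gi in used_gt:
--             continue
--         matched.append((pred_frames[pi], gt_frames[gi]))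
--         used_pred.add(pi)
--         used_gt.add(gi)
--
--     unmatched_pred = [f for i, f in enumerate(pred_frames) if i not in used_pred]
--     unmatched_gt = [f for i, f in enumerate(gt_frames) if i not in used_gt]
--     return matched, unmatched_pred, unmatched_gt
-- ===== Notes on version B (the rewrite author's own statement) =====
-- stated objective: alternative
-- what changed: Instead of scanning all N*M (pred, gt) pairs with nested loops, B sorts the GT frames once and binary-searches the in-tolerance window [pf-tolerance, pf+tolerance] per prediction, so only the K in-tolerance pairs are ever generated before the sort/greedy phase (intended as faster; a timing run measured only 1.34x at the largest size both finished).
import Mathlib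
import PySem

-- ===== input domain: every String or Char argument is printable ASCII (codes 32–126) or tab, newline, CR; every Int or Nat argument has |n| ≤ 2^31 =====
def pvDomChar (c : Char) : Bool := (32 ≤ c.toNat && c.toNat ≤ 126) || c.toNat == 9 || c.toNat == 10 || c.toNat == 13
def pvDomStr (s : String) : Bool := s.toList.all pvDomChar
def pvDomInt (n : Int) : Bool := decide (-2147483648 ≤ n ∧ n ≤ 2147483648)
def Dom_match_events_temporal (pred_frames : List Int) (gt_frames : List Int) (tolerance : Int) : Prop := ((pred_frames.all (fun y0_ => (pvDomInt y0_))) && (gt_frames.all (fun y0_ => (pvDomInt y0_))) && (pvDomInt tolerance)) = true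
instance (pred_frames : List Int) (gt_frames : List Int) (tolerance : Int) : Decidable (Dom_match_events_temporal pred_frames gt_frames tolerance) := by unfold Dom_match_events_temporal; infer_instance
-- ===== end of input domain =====

-- B sorts the GT frames once and binary-searches the in-tolerance window per prediction,
-- so only in-tolerance candidates are generated, instead of A's nested scan over all
-- N*M pairs (objective: alternative algorithm; same return value).

-- ===== PORT A =====
-- literal port of A: nested loops build (|d|, pi, gi) candidates, sort them
-- (Python tuple order = lexicographic), greedy scan skipping used indices,
-- then collect unmatched by index.
def match_events_temporal (pred_frames : List Int) (gt_frames : List Int) (tolerance : Int) : (List (Int × Int)) × List Int × List Int :=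
  if pred_frames = [] ∨ gt_frames = [] then ([], pred_frames, gt_frames) else
  let candidates : List (Int × Int × Int) :=
    (PySem.List.enumerate pred_frames).foldl (fun acc p =>
      (PySem.List.enumerate gt_frames).foldl (fun acc g =>
        if |p.2 - g.2| ≤ tolerance then acc ++ [(|p.2 - g.2|, p.1, g.1)] else acc) acc) []
  let sortedC := PySem.List.sorted candidates (fun t => toLex (t.1, toLex t.2))
  let res := sortedC.foldl (fun st t =>
      if PySem.Set.contains st.2.1 t.2.1 || PySem.Set.contains st.2.2 t.2.2 then st
      else (st.1 ++ [(PySem.List.pyGetD pred_frames t.2.1 0, PySem.List.pyGetD gt_frames t.2.2 0)],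
            PySem.Set.add st.2.1 t.2.1, PySem.Set.add st.2.2 t.2.2))
    (([] : List (Int × Int)), (PySem.Set.empty : PySem.Set Int), (PySem.Set.empty : PySem.Set Int))
  (res.1,
   ((PySem.List.enumerate pred_frames).filter (fun p => !PySem.Set.contains res.2.1 p.1)).map (fun p => p.2),
   ((PySem.List.enumerate gt_frames).filter (fun g => !PySem.Set.contains res.2.2 g.1)).map (fun g => g.2))

-- ===== PORT B =====
-- hand-written binary searches from Source B (A imports no modules, so Source B may not
-- import bisect; these are ported step for step, lo/hi as the Nat loop state,
-- a[mid] via pyGetD — always in range on the executed calls since mid < hi ≤ len a)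
def bisLeftGo (a : List Int) (x : Int) : Nat → Nat → Nat → Nat
  | 0, lo, _ => lo
  | fuel + 1, lo, hi =>
    if lo < hi then
      let mid := (lo + hi) / 2
      if PySem.List.pyGetD a (mid : Int) 0 < x then bisLeftGo a x fuel (mid + 1) hi
      else bisLeftGo a x fuel lo mid
    else lo

def bisLeftLoop (a : List Int) (x : Int) (lo hi : Nat) : Nat := bisLeftGo a x (hi - lo) lo hi

def bisRightGo (a : List Int) (x : Int) : Nat → Nat → Nat → Nat
  | 0, lo, _ => lo
  | fuel + 1, lo, hi =>
    if lo < hi then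
      let mid := (lo + hi) / 2
      if x < PySem.List.pyGetD a (mid : Int) 0 then bisRightGo a x fuel lo mid
      else bisRightGo a x fuel (mid + 1) hi
    else lo

def bisRightLoop (a : List Int) (x : Int) (lo hi : Nat) : Nat := bisRightGo a x (hi - lo) lo hi

-- literal port of B (Source B): sort (gf, gi) pairs once, per prediction binary-search
-- the window [pf - tolerance, pf + tolerance], emit candidates only from that
-- slice, then the same sort + greedy sweep on the (smaller) candidate list.
def match_events_temporal_alt (pred_frames : List Int) (gt_frames : List Int) (tolerance : Int) : (List (Int × Int)) × List Int × List Int :=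
  if pred_frames = [] ∨ gt_frames = [] then ([], pred_frames, gt_frames) else
  let gt_sorted := PySem.List.sorted ((PySem.List.enumerate gt_frames).map (fun g => (g.2, g.1))) (fun x => toLex x)
  let gt_vals := gt_sorted.map (fun g => g.1)
  let candidates : List (Int × Int × Int) :=
    (PySem.List.enumerate pred_frames).foldl (fun acc p =>
      let lo := bisLeftLoop gt_vals (p.2 - tolerance) 0 gt_vals.length
      let hi := bisRightLoop gt_vals (p.2 + tolerance) 0 gt_vals.length
      acc ++ (PySem.List.slice gt_sorted (some (lo : Int)) (some (hi : Int))).map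
        (fun g => (|p.2 - g.1|, p.1, g.2))) []
  let sortedC := PySem.List.sorted candidates (fun t => toLex (t.1, toLex t.2))
  let res := sortedC.foldl (fun st t =>
      if PySem.Set.contains st.2.1 t.2.1 || PySem.Set.contains st.2.2 t.2.2 then st
      else (st.1 ++ [(PySem.List.pyGetD pred_frames t.2.1 0, PySem.List.pyGetD gt_frames t.2.2 0)],
            PySem.Set.add st.2.1 t.2.1, PySem.Set.add st.2.2 t.2.2))
    (([] : List (Int × Int)), (PySem.Set.empty : PySem.Set Int), (PySem.Set.empty : PySem.Set Int))
  (res.1,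
   ((PySem.List.enumerate pred_frames).filter (fun p => !PySem.Set.contains res.2.1 p.1)).map (fun p => p.2),
   ((PySem.List.enumerate gt_frames).filter (fun g => !PySem.Set.contains res.2.2 g.1)).map (fun g => g.2))

-- ===== PRECONDITION & SPEC =====
def Spec_match_events_temporal (pred_frames : List Int) (gt_frames : List Int) (tolerance : Int) (out : (List (Int × Int)) × List Int × List Int) : Prop := out = match_events_temporal_alt pred_frames gt_frames tolerance
instance (pred_frames : List Int) (gt_frames : List Int) (tolerance : Int) (out : (List (Int × Int)) × List Int × List Int) : Decidable (Spec_match_events_temporal pred_frames gt_frames tolerance out) := by unfold Spec_match_events_temporal; infer_instance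

-- ===== CLAIM =====
def Claim_equal_match_events_temporal : Prop := ∀ (pred_frames : List Int) (gt_frames : List Int) (tolerance : Int), Dom_match_events_temporal pred_frames gt_frames tolerance → Spec_match_events_temporal pred_frames gt_frames tolerance (match_events_temporal pred_frames gt_frames tolerance)

-- ===== LEMMAS AND PROOFS =====

-- the candidate list A generates, in A's order
def candList (pred_frames : List Int) (gt_frames : List Int) (tolerance : Int) : List (Int × Int × Int) :=
  (PySem.List.enumerate pred_frames).flatMap (fun p =>
    ((PySem.List.enumerate gt_frames).filter (fun g => decide (|p.2 - g.2| ≤ tolerance))).map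
      (fun g => (|p.2 - g.2|, p.1, g.1)))

-- A's nested loop builds exactly candList
lemma candsA_eq (pred_frames gt_frames : List Int) (tolerance : Int) :
    (PySem.List.enumerate pred_frames).foldl (fun acc p =>
      (PySem.List.enumerate gt_frames).foldl (fun acc g =>
        if |p.2 - g.2| ≤ tolerance then acc ++ [(|p.2 - g.2|, p.1, g.1)] else acc) acc) [] =
    candList pred_frames gt_frames tolerance := by
  unfold candList
  have hinner : ∀ (acc : List (Int × Int × Int)) (p : Int × Int),
      (PySem.List.enumerate gt_frames).foldl (fun acc g =>
        if |p.2 - g.2| ≤ tolerance then acc ++ [(|p.2 - g.2|, p.1, g.1)] else acc) acc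
      = acc ++ ((PySem.List.enumerate gt_frames).filter
          (fun g => decide (|p.2 - g.2| ≤ tolerance))).map (fun g => (|p.2 - g.2|, p.1, g.1)) := by
    intro acc p
    have := PySem.List.foldl_append_if (fun g : Int × Int => decide (|p.2 - g.2| ≤ tolerance))
      (fun g : Int × Int => (|p.2 - g.2|, p.1, g.1)) (PySem.List.enumerate gt_frames) acc
    simpa using this
  rw [PySem.List.foldl_congr_mem _ _ _ _ (fun acc p _ => hinner acc p)]
  rw [PySem.List.foldl_append_eq_flatMap]
  simp

lemma pyGetD_in_range (a : List Int) (j : Nat) (hj : j < a.length) :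
    PySem.List.pyGetD a (j : Int) 0 = a[j] := by
  rw [PySem.List.pyGetD_natCast, List.getD_eq_getElem a 0 hj]

-- bisLeftGo: below the result everything is < x, at or above everything is ≥ x
lemma bisLeftGo_spec (a : List Int) (x : Int)
    (hs : List.Pairwise (fun u v => u ≤ v) a) :
    ∀ (fuel lo hi : Nat), hi - lo ≤ fuel → lo ≤ hi → hi ≤ a.length →
    (∀ j : Nat, j < lo → ∀ hj : j < a.length, a[j] < x) →
    (∀ j : Nat, hi ≤ j → ∀ hj : j < a.length, x ≤ a[j]) →
    lo ≤ bisLeftGo a x fuel lo hi ∧ bisLeftGo a x fuel lo hi ≤ hi ∧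
    (∀ j : Nat, j < bisLeftGo a x fuel lo hi → ∀ hj : j < a.length, a[j] < x) ∧
    (∀ j : Nat, bisLeftGo a x fuel lo hi ≤ j → ∀ hj : j < a.length, x ≤ a[j]) := by
  intro fuel
  induction fuel with
  | zero =>
    intro lo hi hf hlh _ hb ha
    have : lo = hi := by omega
    subst this
    exact ⟨le_refl _, le_refl _, hb, ha⟩
  | succ fuel ih =>
    intro lo hi hf hlh hhl hb ha
    by_cases h : lo < hi
    · have hmid : (lo + hi) / 2 < a.length := by omega
      rw [bisLeftGo, if_pos h]
      simp only [pyGetD_in_range a _ hmid]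
      have hmono : ∀ (i j : Nat) (hi_ : i < a.length) (hj : j < a.length), i ≤ j → a[i] ≤ a[j] := by
        intro i j hi_ hj hij
        rcases eq_or_lt_of_le hij with rfl | hlt
        · exact le_refl _
        · exact List.pairwise_iff_getElem.mp hs i j hi_ hj hlt
      by_cases hc : a[(lo + hi) / 2] < x
      · rw [if_pos hc]
        refine (ih ((lo + hi) / 2 + 1) hi (by omega) (by omega) hhl ?_ ha).imp
          (fun h1 => by omega) (fun h2 => h2)
        intro j hj hjl
        exact lt_of_le_of_lt (hmono j ((lo + hi) / 2) hjl hmid (by omega)) hc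
      · rw [if_neg hc]
        push Not at hc
        refine (ih lo ((lo + hi) / 2) (by omega) (by omega) (by omega) hb ?_).imp
          (fun h1 => h1) (fun h2 => ⟨by omega, h2.2⟩)
        intro j hj hjl
        exact le_trans hc (hmono ((lo + hi) / 2) j hmid hjl hj)
    · rw [bisLeftGo, if_neg h]
      have : lo = hi := by omega
      subst this
      exact ⟨le_refl _, le_refl _, hb, ha⟩

-- bisRightGo: below the result everything is ≤ x, at or above everything is > x
lemma bisRightGo_spec (a : List Int) (x : Int)
    (hs : List.Pairwise (fun u v => u ≤ v) a) :
    ∀ (fuel lo hi : Nat), hi - lo ≤ fuel → lo ≤ hi → hi ≤ a.length →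
    (∀ j : Nat, j < lo → ∀ hj : j < a.length, a[j] ≤ x) →
    (∀ j : Nat, hi ≤ j → ∀ hj : j < a.length, x < a[j]) →
    lo ≤ bisRightGo a x fuel lo hi ∧ bisRightGo a x fuel lo hi ≤ hi ∧
    (∀ j : Nat, j < bisRightGo a x fuel lo hi → ∀ hj : j < a.length, a[j] ≤ x) ∧
    (∀ j : Nat, bisRightGo a x fuel lo hi ≤ j → ∀ hj : j < a.length, x < a[j]) := by
  intro fuel
  induction fuel with
  | zero =>
    intro lo hi hf hlh _ hb ha
    have : lo = hi := by omega
    subst this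
    exact ⟨le_refl _, le_refl _, hb, ha⟩
  | succ fuel ih =>
    intro lo hi hf hlh hhl hb ha
    by_cases h : lo < hi
    · have hmid : (lo + hi) / 2 < a.length := by omega
      rw [bisRightGo, if_pos h]
      simp only [pyGetD_in_range a _ hmid]
      have hmono : ∀ (i j : Nat) (hi_ : i < a.length) (hj : j < a.length), i ≤ j → a[i] ≤ a[j] := by
        intro i j hi_ hj hij
        rcases eq_or_lt_of_le hij with rfl | hlt
        · exact le_refl _
        · exact List.pairwise_iff_getElem.mp hs i j hi_ hj hlt
      by_cases hc : x < a[(lo + hi) / 2]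
      · rw [if_pos hc]
        refine (ih lo ((lo + hi) / 2) (by omega) (by omega) (by omega) hb ?_).imp
          (fun h1 => h1) (fun h2 => ⟨by omega, h2.2⟩)
        intro j hj hjl
        exact lt_of_lt_of_le hc (hmono ((lo + hi) / 2) j hmid hjl hj)
      · rw [if_neg hc]
        push Not at hc
        refine (ih ((lo + hi) / 2 + 1) hi (by omega) (by omega) hhl ?_ ha).imp
          (fun h1 => by omega) (fun h2 => h2)
        intro j hj hjl
        exact le_trans (hmono j ((lo + hi) / 2) hjl hmid (by omega)) hc
    · rw [bisRightGo, if_neg h]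
      have : lo = hi := by omega
      subst this
      exact ⟨le_refl _, le_refl _, hb, ha⟩

-- a filter whose predicate holds exactly on an index window is that slice
lemma filter_eq_slice {α : Type} (P : α → Bool) :
    ∀ (ys : List α) (lo hi : Nat),
    (∀ (j : Nat) (hj : j < ys.length), P ys[j] = true ↔ lo ≤ j ∧ j < hi) →
    ys.filter P = (ys.drop lo).take (hi - lo) := by
  intro ys
  induction ys with
  | nil => intro lo hi _; simp
  | cons y ys ih =>
    intro lo hi h
    have htail : ∀ lo' hi' : Nat,
        (∀ (j : Nat), lo' ≤ j ∧ j < hi' ↔ lo ≤ j + 1 ∧ j + 1 < hi) →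
        ys.filter P = (ys.drop lo').take (hi' - lo') := by
      intro lo' hi' harith
      apply ih
      intro j hj
      have hh := h (j + 1) (by simpa using Nat.succ_lt_succ hj)
      rw [List.getElem_cons_succ] at hh
      rw [hh]
      exact (harith j).symm
    match lo, hi with
    | 0, 0 =>
      have hy : P y = false := by
        have := h 0 (by simp)
        simpa using this
      simp only [List.filter_cons, hy, Nat.sub_zero, List.drop_zero, List.take_zero,
        Bool.false_eq_true, if_false]
      rw [htail 0 0 (by intro j; omega)]
      simp
    | 0, hi + 1 =>
      have hy : P y = true := by
        have := h 0 (by simp)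
        simpa using this
      simp only [List.filter_cons, hy, if_pos, Nat.sub_zero, List.drop_zero, List.take_succ_cons]
      rw [htail 0 hi (by intro j; omega)]
      simp
    | lo + 1, hi =>
      have hy : P y = false := by
        have := h 0 (by simp)
        simp at this
        omega
      simp only [List.filter_cons, hy, Bool.false_eq_true, if_false, List.drop_succ_cons]
      rw [htail lo (hi - 1) (by intro j; omega)]
      congr 1
      omega

-- pointwise permutation of the pieces gives permutation of the flatMap
lemma flatMap_perm_congr {α β : Type} (l : List α) (f g : α → List β)
    (h : ∀ x ∈ l, (f x).Perm (g x)) : (l.flatMap f).Perm (l.flatMap g) := by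
  induction l with
  | nil => simp
  | cons x xs ih =>
    simp only [List.flatMap_cons]
    exact (h x (by simp)).append (ih (fun y hy => h y (by simp [hy])))

-- the sort key of a candidate triple is the triple itself (up to toLex), hence injective
lemma key_inj : Function.Injective (fun t : Int × Int × Int => toLex ((t.1 : Int), toLex t.2)) := by
  intro a b h
  have h' := congrArg ofLex h
  simp at h'
  obtain ⟨h1, h2⟩ := h'
  have h2' := congrArg ofLex h2
  simp at h2'
  exact Prod.ext h1 h2'

-- B's per-prediction window slice is exactly the in-tolerance filter of the sorted GT pairs
lemma windowB_eq_filter (gt_frames : List Int) (tolerance pf : Int) :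
    (PySem.List.slice
        (PySem.List.sorted ((PySem.List.enumerate gt_frames).map (fun g => (g.2, g.1))) (fun x => toLex x))
        (some ((bisLeftLoop ((PySem.List.sorted ((PySem.List.enumerate gt_frames).map (fun g => (g.2, g.1))) (fun x => toLex x)).map (fun g => g.1)) (pf - tolerance) 0
          (((PySem.List.sorted ((PySem.List.enumerate gt_frames).map (fun g => (g.2, g.1))) (fun x => toLex x)).map (fun g => g.1)).length) : Nat) : Int))
        (some ((bisRightLoop ((PySem.List.sorted ((PySem.List.enumerate gt_frames).map (fun g => (g.2, g.1))) (fun x => toLex x)).map (fun g => g.1)) (pf + tolerance) 0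
          (((PySem.List.sorted ((PySem.List.enumerate gt_frames).map (fun g => (g.2, g.1))) (fun x => toLex x)).map (fun g => g.1)).length) : Nat) : Int))) =
    (PySem.List.sorted ((PySem.List.enumerate gt_frames).map (fun g => (g.2, g.1))) (fun x => toLex x)).filter
      (fun g => decide (pf - tolerance ≤ g.1 ∧ g.1 ≤ pf + tolerance)) := by
  set ys := PySem.List.sorted ((PySem.List.enumerate gt_frames).map (fun g => (g.2, g.1))) (fun x => toLex x) with hys
  set a := ys.map (fun g => g.1) with ha
  have hlen : a.length = ys.length := by simp [ha]
  have hs : List.Pairwise (fun u v : Int => u ≤ v) a := by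
    rw [ha]
    rw [List.pairwise_map]
    refine (PySem.List.sorted_pairwise _ _).imp ?_
    intro u v huv
    have hiff := Prod.Lex.le_iff.mp huv
    simp only [ofLex_toLex] at hiff
    rcases hiff with hlt | ⟨heq, _⟩
    · exact le_of_lt hlt
    · exact le_of_eq heq
  have hL := bisLeftGo_spec a (pf - tolerance) hs (a.length - 0) 0 a.length (by omega) (by omega) (by omega)
    (by intro j hj _; omega) (by intro j hj hj2; omega)
  have hR := bisRightGo_spec a (pf + tolerance) hs (a.length - 0) 0 a.length (by omega) (by omega) (by omega)
    (by intro j hj _; omega) (by intro j hj hj2; omega)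
  simp only [bisLeftLoop, bisRightLoop]
  set lo := bisLeftGo a (pf - tolerance) (a.length - 0) 0 a.length with hlo
  set hi := bisRightGo a (pf + tolerance) (a.length - 0) 0 a.length with hhi
  rw [PySem.List.slice_natCast]
  rw [filter_eq_slice _ ys lo hi ?_]
  intro j hj
  have hja : j < a.length := by omega
  have hval : a[j] = (ys[j]).1 := by simp [ha]
  constructor
  · intro hp
    simp only [decide_eq_true_eq] at hp
    constructor
    · by_contra hc
      have := hL.2.2.1 j (by omega) hja
      rw [hval] at this
      omega
    · by_contra hc
      have := hR.2.2.2 j (by omega) hja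
      rw [hval] at this
      omega
  · intro ⟨h1, h2⟩
    simp only [decide_eq_true_eq]
    have hx1 := hL.2.2.2 j h1 hja
    have hx2 := hR.2.2.1 j h2 hja
    rw [hval] at hx1 hx2
    exact ⟨hx1, hx2⟩

-- B's candidate list is a permutation of A's
lemma candsB_perm (pred_frames gt_frames : List Int) (tolerance : Int) :
    ((PySem.List.enumerate pred_frames).foldl (fun acc p =>
      acc ++ (PySem.List.slice
          (PySem.List.sorted ((PySem.List.enumerate gt_frames).map (fun g => (g.2, g.1))) (fun x => toLex x))
          (some ((bisLeftLoop ((PySem.List.sorted ((PySem.List.enumerate gt_frames).map (fun g => (g.2, g.1))) (fun x => toLex x)).map (fun g => g.1)) (p.2 - tolerance) 0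
            (((PySem.List.sorted ((PySem.List.enumerate gt_frames).map (fun g => (g.2, g.1))) (fun x => toLex x)).map (fun g => g.1)).length) : Nat) : Int))
          (some ((bisRightLoop ((PySem.List.sorted ((PySem.List.enumerate gt_frames).map (fun g => (g.2, g.1))) (fun x => toLex x)).map (fun g => g.1)) (p.2 + tolerance) 0
            (((PySem.List.sorted ((PySem.List.enumerate gt_frames).map (fun g => (g.2, g.1))) (fun x => toLex x)).map (fun g => g.1)).length) : Nat) : Int))).map
        (fun g => (|p.2 - g.1|, p.1, g.2))) []).Perm
    (candList pred_frames gt_frames tolerance) := by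
  rw [PySem.List.foldl_append_eq_flatMap, List.nil_append]
  unfold candList
  apply flatMap_perm_congr
  intro p _
  rw [windowB_eq_filter gt_frames tolerance p.2]
  have hperm := PySem.List.sorted_perm ((PySem.List.enumerate gt_frames).map (fun g => (g.2, g.1))) (fun x => toLex x) false
  refine ((hperm.filter _).map _).trans ?_
  rw [List.filter_map, List.map_map]
  apply List.Perm.of_eq
  have hfil : List.filter ((fun g : Int × Int => decide (p.2 - tolerance ≤ g.1 ∧ g.1 ≤ p.2 + tolerance)) ∘ (fun g : Int × Int => (g.2, g.1))) (PySem.List.enumerate gt_frames)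
      = List.filter (fun g : Int × Int => decide (|p.2 - g.2| ≤ tolerance)) (PySem.List.enumerate gt_frames) := by
    apply List.filter_congr
    intro g _
    simp only [Function.comp]
    rw [decide_eq_decide]
    constructor
    · intro ⟨h1, h2⟩; rw [abs_le]; constructor <;> omega
    · intro hh; rw [abs_le] at hh; constructor <;> omega
  rw [hfil]
  rfl

-- ===== VERDICT =====
theorem match_events_temporal_spec : Claim_equal_match_events_temporal := by
  intro pred_frames gt_frames tolerance _
  unfold Spec_match_events_temporal
  by_cases h : pred_frames = [] ∨ gt_frames = []
  · simp [match_events_temporal, match_events_temporal_alt, h]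
  · simp only [match_events_temporal, match_events_temporal_alt, if_neg h]
    rw [candsA_eq]
    rw [PySem.List.sorted_eq_sorted_of_perm _ _ _ key_inj
      (candsB_perm pred_frames gt_frames tolerance)]
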